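-- pv_equiv track=rewrite | github.com/ksy990628/Study_Python | 재고없는날.py | solution
-- ===== SOURCE A (Python) =====
-- def solution(n,m):
--     total = n
--     day = 0
--     while total > 0:
--         day += 1
--         total -= 1
--         if day % m == 0:
--             total += 1
--
--     return day
-- ===== SOURCE B (Python) =====
-- def solution(n, m):
--     # Closed form: answer is the n-th positive integer not divisible by |m|.
--     if n <= 0:
--         return 0
--     M = abs(m)
--     q = (n - 1) // (M - 1)
--     r = (n - 1) % (M - 1)
--     return q * M + r + 1
-- ===== Notes on version B (the rewrite author's own statement) =====
-- stated objective: faster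
-- what changed: Replaced the day-by-day simulation loop with an O(1) closed form (the answer is the n-th positive integer not divisible by |m|, computed with one divmod).
import Mathlib
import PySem

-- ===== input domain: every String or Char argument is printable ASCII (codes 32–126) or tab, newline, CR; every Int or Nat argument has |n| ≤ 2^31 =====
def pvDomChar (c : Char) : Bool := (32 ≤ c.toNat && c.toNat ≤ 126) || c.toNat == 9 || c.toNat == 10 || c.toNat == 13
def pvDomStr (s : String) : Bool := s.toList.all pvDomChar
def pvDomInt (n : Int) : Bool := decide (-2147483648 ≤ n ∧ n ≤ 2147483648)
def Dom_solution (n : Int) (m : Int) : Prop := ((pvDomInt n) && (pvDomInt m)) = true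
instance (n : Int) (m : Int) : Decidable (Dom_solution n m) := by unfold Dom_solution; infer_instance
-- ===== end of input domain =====

-- B replaces A's day-by-day simulation loop by an O(1) closed form (one integer division); equality proved on Pre_ (A does not return for m ∈ {-1,0,1} when n > 0).

-- ===== PORT A =====
-- the while loop, with fuel only as a totality guard (proved sufficient on Pre_)
def solutionLoop (m : Int) : Nat → Int → Int → Int
  | 0, _, day => day
  | fuel+1, total, day =>
    if total > 0 then
      let day' := day + 1
      let total' := total - 1
      let total'' := if PySem.Int.mod day' m = 0 then total' + 1 else total'
      solutionLoop m fuel total'' day'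
    else day

def solution (n : Int) (m : Int) : Int := solutionLoop m (2*n).toNat n 0

-- ===== PORT B =====
def solution_alt (n : Int) (m : Int) : Int :=
  if n ≤ 0 then 0
  else
    PySem.Int.floordiv (n-1) (|m|-1) * |m| + PySem.Int.mod (n-1) (|m|-1) + 1

-- ===== PRECONDITION & SPEC =====
-- Pre_ excludes only inputs on which A does not return: with n > 0, A raises ZeroDivisionError for m = 0 and loops forever for m = ±1.
def Pre_solution (n : Int) (m : Int) : Prop := n ≤ 0 ∨ 2 ≤ m ∨ m ≤ -2
instance (n : Int) (m : Int) : Decidable (Pre_solution n m) := by unfold Pre_solution; infer_instance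
def pvWitness_solution : Int × Int := (7, 3)
def Spec_solution (n : Int) (m : Int) (out : Int) : Prop := out = solution_alt n m
instance (n : Int) (m : Int) (out : Int) : Decidable (Spec_solution n m out) := by unfold Spec_solution; infer_instance

-- ===== CLAIM (what is proved, stated in full; the proofs are below) =====
def Claim_equal_solution : Prop := ∀ (n : Int) (m : Int), Dom_solution n m → Pre_solution n m → Spec_solution n m (solution n m)

-- ===== LEMMAS AND PROOFS =====

-- remaining number of iterations of A's loop from state (total, day)
def Tfun (M total day : Int) : Int := total + (day % M + total - 1) / (M - 1)

theorem solutionLoop_done (m : Int) (fuel : Nat) (total day : Int) (h : ¬ total > 0) :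
    solutionLoop m fuel total day = day := by
  cases fuel with
  | zero => rfl
  | succ k => simp [solutionLoop, h]

theorem Tfun_pos (M total day : Int) (hM : 2 ≤ M) (ht : 1 ≤ total) :
    1 ≤ Tfun M total day := by
  have h2 : (0:Int) ≤ (day % M + total - 1) / (M - 1) :=
    Int.ediv_nonneg (by have := Int.emod_nonneg day (show M ≠ 0 by omega); omega) (by omega)
  unfold Tfun; omega

theorem solutionLoop_eq (fuel : Nat) : ∀ (m total day : Int), 2 ≤ |m| → 1 ≤ total → 0 ≤ day →
    Tfun |m| total day ≤ fuel → solutionLoop m fuel total day = day + Tfun |m| total day := by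
  induction fuel with
  | zero =>
    intro m total day hM ht hd hfuel
    have := Tfun_pos |m| total day hM ht
    omega
  | succ k ih =>
    intro m total day hM ht hd hfuel
    have hMpos : (0:Int) < |m| := by omega
    have hmod : PySem.Int.mod (day+1) m = 0 ↔ |m| ∣ (day+1) := by
      rw [PySem.Int.mod_eq_zero_iff_dvd]
      exact (abs_dvd m (day+1)).symm
    have hr0 : 0 ≤ day % |m| := Int.emod_nonneg day (by omega)
    have hrlt : day % |m| < |m| := Int.emod_lt_of_pos day hMpos
    have h1M : (1:Int) % |m| = 1 := Int.emod_eq_of_lt (by omega) (by omega)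
    rw [solutionLoop]
    simp only [if_pos (by omega : total > 0)]
    by_cases hdvd : |m| ∣ (day + 1)
    · -- restock day: total unchanged
      rw [if_pos (hmod.mpr hdvd)]
      have hmod1 : (day + 1) % |m| = 0 := Int.emod_eq_zero_of_dvd hdvd
      have hday : day % |m| = |m| - 1 := by
        have h2 : (day + 1) % |m| = (day % |m| + 1) % |m| := by rw [Int.add_emod, h1M]
        by_contra hne2
        have h3 : (day % |m| + 1) % |m| = day % |m| + 1 := Int.emod_eq_of_lt (by omega) (by omega)
        omega
      have hT : Tfun |m| total (day + 1) = Tfun |m| total day - 1 := by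
        unfold Tfun
        rw [hmod1, hday, show (|m| - 1 + total - 1) = (total - 1) + 1 * (|m| - 1) by ring,
            Int.add_mul_ediv_right _ _ (by omega : |m| - 1 ≠ 0),
            show (0 + total - 1) = total - 1 by ring]
        omega
      have ht' := Tfun_pos |m| total day hM ht
      rw [show total - 1 + 1 = total by ring,
          ih m total (day + 1) hM ht (by omega) (by omega : Tfun |m| total (day+1) ≤ k)]
      omega
    · -- ordinary day: total decreases by 1
      rw [if_neg (fun h => hdvd (hmod.mp h))]
      have hadd : (day + 1) % |m| = (day % |m| + 1) % |m| := by
        rw [Int.add_emod, h1M]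
      have hne : day % |m| ≠ |m| - 1 := by
        intro he
        apply hdvd
        apply Int.dvd_of_emod_eq_zero
        rw [hadd, he, show |m| - 1 + 1 = |m| by ring, Int.emod_self]
      have hmod1 : (day + 1) % |m| = day % |m| + 1 := by
        rw [hadd, Int.emod_eq_of_lt (by omega) (by omega)]
      by_cases h1 : total = 1
      · subst h1
        rw [solutionLoop_done m k (1-1) (day+1) (by omega)]
        have hT1 : Tfun |m| 1 day = 1 := by
          unfold Tfun
          rw [show day % |m| + 1 - 1 = day % |m| by ring,
              Int.ediv_eq_zero_of_lt hr0 (by omega)]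
          omega
        omega
      · have hT : Tfun |m| (total - 1) (day + 1) = Tfun |m| total day - 1 := by
          unfold Tfun
          rw [hmod1, show day % |m| + 1 + (total - 1) - 1 = day % |m| + total - 1 by ring]
          omega
        have ht' := Tfun_pos |m| total day hM ht
        rw [ih m (total - 1) (day + 1) hM (by omega) (by omega) (by omega)]
        omega

-- ===== VERDICT (by name: the statement is the Claim_ definition above) =====
theorem solution_spec : Claim_equal_solution := by
  intro n m _ hpre
  unfold Spec_solution solution solution_alt
  by_cases hn : n ≤ 0
  · have h0 : (2*n).toNat = 0 := by omega
    rw [h0, if_pos hn]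
    rfl
  · have hM : 2 ≤ |m| := by
      rcases hpre with h | h | h
      · omega
      · exact le_abs.mpr (Or.inl h)
      · exact le_abs.mpr (Or.inr (by omega))
    have hMpos : (0:Int) < |m| - 1 := by omega
    have hdivle : (n - 1) / (|m| - 1) ≤ n - 1 := Int.ediv_le_self _ (by omega)
    have hdiv0 : 0 ≤ (n - 1) / (|m| - 1) := Int.ediv_nonneg (by omega) (by omega)
    have hfuel : Tfun |m| n 0 ≤ ((2*n).toNat : Int) := by
      unfold Tfun
      rw [Int.zero_emod, show (0 + n - 1) = n - 1 by ring]
      omega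
    rw [solutionLoop_eq (2*n).toNat m n 0 hM (by omega) le_rfl hfuel, if_neg hn]
    unfold Tfun
    rw [Int.zero_emod, show (0 + n - 1) = n - 1 by ring,
        PySem.Int.floordiv_eq_ediv_of_pos hMpos, PySem.Int.mod_eq_emod_of_pos hMpos]
    have h := Int.ediv_add_emod (n-1) (|m|-1)
    linear_combination -h
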